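-- pv_equiv track=rewrite | github.com/CreeperBeatz/JournAI | modules/emotions_tracker.py | find_emotion_ancestors
-- ===== SOURCE A (Python) =====
-- emotions_structure = {
--     "Happy": {
--         "Playful": ["Aroused", "Cheeky"],
--         "Content": ["Free", "Joyful"],
--         "Interested": ["Curious", "Inquisitive"],
--         "Proud": ["Successful", "Confident"],
--         "Accepted": ["Respected", "Valued"],
--         "Powerful": ["Courageous", "Creative"],
--         "Peaceful": ["Loving", "Thankful"],
--         "Trusting": ["Intimate", "Sensitive"]
--     },
--     "Sad": {
--         "Lonely": ["Isolated", "Abandoned"],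
--         "Vulnerable": ["Victimized", "Fragile"],
--         "Despair": ["Grief", "Powerless"],
--         "Guilty": ["Ashamed", "Remorseful"],
--         "Depressed": ["Inferior", "Empty"],
--         "Hurt": ["Embarrassed", "Disappointed"]
--     },
--     "Disgusted": {
--         "Disapproving": ["Judgmental", "Embarrassed"],
--         "Disappointed": ["Appalled", "Revolted"],
--         "Awful": ["Nauseated", "Detestable"],
--         "Repelled": ["Horrified", "Hesitant"]
--     },
--     "Angry": {
--         "Let Down": ["Betrayed", "Resentful"],
--         "Humiliated": ["Disrespected", "Ridiculed"],
--         "Bitter": ["Indignant", "Violated"],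
--         "Mad": ["Furious", "Jealous"],
--         "Aggressive": ["Provoked", "Hostile"],
--         "Frustrated": ["Infuriated", "Annoyed"],
--         "Distant": ["Withdrawn", "Numb"],
--         "Critical": ["Skeptical", "Dismissive"]
--     },
--     "Fearful": {
--         "Scared": ["Helpless", "Frightened"],
--         "Anxious": ["Overwhelmed", "Worried"],
--         "Insecure": ["Inadequate", "Inferior"],
--         "Weak": ["Worthless", "Insignificant"],
--         "Rejected": ["Excluded", "Persecuted"],
--         "Threatened": ["Nervous", "Exposed"]
--     },
--     "Bad": {
--         "Bored": ["Indifferent", "Apathetic"],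
--         "Busy": ["Pressured", "Rushed"],
--         "Stressed": ["Overwhelmed", "Out of control"],
--         "Tired": ["Sleepy", "Unfocused"]
--     },
--     "Surprised": {
--         "Startled": ["Shocked", "Dismayed"],
--         "Confused": ["Disillusioned", "Perplexed"],
--         "Amazed": ["Astonished", "Awe"],
--         "Excited": ["Eager", "Energetic"]
--     }
-- }
--
-- def find_emotion_ancestors(emotion: str) -> list:
--     """
--     This function traverses the emotions structure
--
--     Parameters:
--     emotion (str): The emotion for which ancestors are to be found.
--
--     Returns:
--         list: A list of emotions, OR empty list if emotion not found
--     """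
--     for base_emotion, secondary_emotions in emotions_structure.items():
--         if emotion == base_emotion:
--             return [emotion]
--         for secondary_emotion, tertiary_emotions in secondary_emotions.items():
--             if emotion in tertiary_emotions:
--                 return [base_emotion, secondary_emotion, emotion]
--             elif emotion == secondary_emotion:
--                 return [base_emotion, emotion]
--     return []  # Returns an empty list if the emotion is not found
-- ===== SOURCE B (Python) =====
-- # B: a flat precomputed path table (name -> full ancestor path), generated once
-- # from the emotion tree with first-occurrence priority; lookup is a single O(1)
-- # dict .get instead of A's nested three-level scan.
-- _ancestor_paths = {
--     'Happy': ['Happy'],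
--     'Aroused': ['Happy', 'Playful', 'Aroused'],
--     'Cheeky': ['Happy', 'Playful', 'Cheeky'],
--     'Playful': ['Happy', 'Playful'],
--     'Free': ['Happy', 'Content', 'Free'],
--     'Joyful': ['Happy', 'Content', 'Joyful'],
--     'Content': ['Happy', 'Content'],
--     'Curious': ['Happy', 'Interested', 'Curious'],
--     'Inquisitive': ['Happy', 'Interested', 'Inquisitive'],
--     'Interested': ['Happy', 'Interested'],
--     'Successful': ['Happy', 'Proud', 'Successful'],
--     'Confident': ['Happy', 'Proud', 'Confident'],
--     'Proud': ['Happy', 'Proud'],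
--     'Respected': ['Happy', 'Accepted', 'Respected'],
--     'Valued': ['Happy', 'Accepted', 'Valued'],
--     'Accepted': ['Happy', 'Accepted'],
--     'Courageous': ['Happy', 'Powerful', 'Courageous'],
--     'Creative': ['Happy', 'Powerful', 'Creative'],
--     'Powerful': ['Happy', 'Powerful'],
--     'Loving': ['Happy', 'Peaceful', 'Loving'],
--     'Thankful': ['Happy', 'Peaceful', 'Thankful'],
--     'Peaceful': ['Happy', 'Peaceful'],
--     'Intimate': ['Happy', 'Trusting', 'Intimate'],
--     'Sensitive': ['Happy', 'Trusting', 'Sensitive'],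
--     'Trusting': ['Happy', 'Trusting'],
--     'Sad': ['Sad'],
--     'Isolated': ['Sad', 'Lonely', 'Isolated'],
--     'Abandoned': ['Sad', 'Lonely', 'Abandoned'],
--     'Lonely': ['Sad', 'Lonely'],
--     'Victimized': ['Sad', 'Vulnerable', 'Victimized'],
--     'Fragile': ['Sad', 'Vulnerable', 'Fragile'],
--     'Vulnerable': ['Sad', 'Vulnerable'],
--     'Grief': ['Sad', 'Despair', 'Grief'],
--     'Powerless': ['Sad', 'Despair', 'Powerless'],
--     'Despair': ['Sad', 'Despair'],
--     'Ashamed': ['Sad', 'Guilty', 'Ashamed'],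
--     'Remorseful': ['Sad', 'Guilty', 'Remorseful'],
--     'Guilty': ['Sad', 'Guilty'],
--     'Inferior': ['Sad', 'Depressed', 'Inferior'],
--     'Empty': ['Sad', 'Depressed', 'Empty'],
--     'Depressed': ['Sad', 'Depressed'],
--     'Embarrassed': ['Sad', 'Hurt', 'Embarrassed'],
--     'Disappointed': ['Sad', 'Hurt', 'Disappointed'],
--     'Hurt': ['Sad', 'Hurt'],
--     'Disgusted': ['Disgusted'],
--     'Judgmental': ['Disgusted', 'Disapproving', 'Judgmental'],
--     'Disapproving': ['Disgusted', 'Disapproving'],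
--     'Appalled': ['Disgusted', 'Disappointed', 'Appalled'],
--     'Revolted': ['Disgusted', 'Disappointed', 'Revolted'],
--     'Nauseated': ['Disgusted', 'Awful', 'Nauseated'],
--     'Detestable': ['Disgusted', 'Awful', 'Detestable'],
--     'Awful': ['Disgusted', 'Awful'],
--     'Horrified': ['Disgusted', 'Repelled', 'Horrified'],
--     'Hesitant': ['Disgusted', 'Repelled', 'Hesitant'],
--     'Repelled': ['Disgusted', 'Repelled'],
--     'Angry': ['Angry'],
--     'Betrayed': ['Angry', 'Let Down', 'Betrayed'],
--     'Resentful': ['Angry', 'Let Down', 'Resentful'],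
--     'Let Down': ['Angry', 'Let Down'],
--     'Disrespected': ['Angry', 'Humiliated', 'Disrespected'],
--     'Ridiculed': ['Angry', 'Humiliated', 'Ridiculed'],
--     'Humiliated': ['Angry', 'Humiliated'],
--     'Indignant': ['Angry', 'Bitter', 'Indignant'],
--     'Violated': ['Angry', 'Bitter', 'Violated'],
--     'Bitter': ['Angry', 'Bitter'],
--     'Furious': ['Angry', 'Mad', 'Furious'],
--     'Jealous': ['Angry', 'Mad', 'Jealous'],
--     'Mad': ['Angry', 'Mad'],
--     'Provoked': ['Angry', 'Aggressive', 'Provoked'],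
--     'Hostile': ['Angry', 'Aggressive', 'Hostile'],
--     'Aggressive': ['Angry', 'Aggressive'],
--     'Infuriated': ['Angry', 'Frustrated', 'Infuriated'],
--     'Annoyed': ['Angry', 'Frustrated', 'Annoyed'],
--     'Frustrated': ['Angry', 'Frustrated'],
--     'Withdrawn': ['Angry', 'Distant', 'Withdrawn'],
--     'Numb': ['Angry', 'Distant', 'Numb'],
--     'Distant': ['Angry', 'Distant'],
--     'Skeptical': ['Angry', 'Critical', 'Skeptical'],
--     'Dismissive': ['Angry', 'Critical', 'Dismissive'],
--     'Critical': ['Angry', 'Critical'],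
--     'Fearful': ['Fearful'],
--     'Helpless': ['Fearful', 'Scared', 'Helpless'],
--     'Frightened': ['Fearful', 'Scared', 'Frightened'],
--     'Scared': ['Fearful', 'Scared'],
--     'Overwhelmed': ['Fearful', 'Anxious', 'Overwhelmed'],
--     'Worried': ['Fearful', 'Anxious', 'Worried'],
--     'Anxious': ['Fearful', 'Anxious'],
--     'Inadequate': ['Fearful', 'Insecure', 'Inadequate'],
--     'Insecure': ['Fearful', 'Insecure'],
--     'Worthless': ['Fearful', 'Weak', 'Worthless'],
--     'Insignificant': ['Fearful', 'Weak', 'Insignificant'],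
--     'Weak': ['Fearful', 'Weak'],
--     'Excluded': ['Fearful', 'Rejected', 'Excluded'],
--     'Persecuted': ['Fearful', 'Rejected', 'Persecuted'],
--     'Rejected': ['Fearful', 'Rejected'],
--     'Nervous': ['Fearful', 'Threatened', 'Nervous'],
--     'Exposed': ['Fearful', 'Threatened', 'Exposed'],
--     'Threatened': ['Fearful', 'Threatened'],
--     'Bad': ['Bad'],
--     'Indifferent': ['Bad', 'Bored', 'Indifferent'],
--     'Apathetic': ['Bad', 'Bored', 'Apathetic'],
--     'Bored': ['Bad', 'Bored'],
--     'Pressured': ['Bad', 'Busy', 'Pressured'],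
--     'Rushed': ['Bad', 'Busy', 'Rushed'],
--     'Busy': ['Bad', 'Busy'],
--     'Out of control': ['Bad', 'Stressed', 'Out of control'],
--     'Stressed': ['Bad', 'Stressed'],
--     'Sleepy': ['Bad', 'Tired', 'Sleepy'],
--     'Unfocused': ['Bad', 'Tired', 'Unfocused'],
--     'Tired': ['Bad', 'Tired'],
--     'Surprised': ['Surprised'],
--     'Shocked': ['Surprised', 'Startled', 'Shocked'],
--     'Dismayed': ['Surprised', 'Startled', 'Dismayed'],
--     'Startled': ['Surprised', 'Startled'],
--     'Disillusioned': ['Surprised', 'Confused', 'Disillusioned'],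
--     'Perplexed': ['Surprised', 'Confused', 'Perplexed'],
--     'Confused': ['Surprised', 'Confused'],
--     'Astonished': ['Surprised', 'Amazed', 'Astonished'],
--     'Awe': ['Surprised', 'Amazed', 'Awe'],
--     'Amazed': ['Surprised', 'Amazed'],
--     'Eager': ['Surprised', 'Excited', 'Eager'],
--     'Energetic': ['Surprised', 'Excited', 'Energetic'],
--     'Excited': ['Surprised', 'Excited'],
-- }
--
-- def find_emotion_ancestors(emotion: str) -> list:
--     return list(_ancestor_paths.get(emotion, []))
-- ===== Notes on version B (the rewrite author's own statement) =====
-- stated objective: faster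
-- what changed: Replaces A's nested three-level scan over the emotion tree with a flat precomputed name->path table (first occurrence wins, tertiaries before their secondary, matching A's match priority); each call is a single dict lookup.
import Mathlib
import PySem

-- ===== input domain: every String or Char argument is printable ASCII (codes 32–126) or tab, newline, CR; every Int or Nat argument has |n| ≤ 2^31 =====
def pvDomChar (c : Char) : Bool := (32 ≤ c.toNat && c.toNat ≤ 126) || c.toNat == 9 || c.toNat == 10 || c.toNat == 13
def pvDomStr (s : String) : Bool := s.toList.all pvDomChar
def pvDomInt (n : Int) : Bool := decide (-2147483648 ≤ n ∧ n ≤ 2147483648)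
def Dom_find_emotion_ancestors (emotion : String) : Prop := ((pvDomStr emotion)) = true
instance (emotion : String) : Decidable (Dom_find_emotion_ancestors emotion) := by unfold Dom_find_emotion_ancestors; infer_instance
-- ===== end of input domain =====

-- B replaces A's nested three-level scan with a flat precomputed name→path table and one O(1) lookup.

-- ===== PORT A =====
def emotionsStructure : List (String × List (String × List String)) := [
  ("Happy", [
      ("Playful", ["Aroused", "Cheeky"]),
      ("Content", ["Free", "Joyful"]),
      ("Interested", ["Curious", "Inquisitive"]),
      ("Proud", ["Successful", "Confident"]),
      ("Accepted", ["Respected", "Valued"]),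
      ("Powerful", ["Courageous", "Creative"]),
      ("Peaceful", ["Loving", "Thankful"]),
      ("Trusting", ["Intimate", "Sensitive"])]),
  ("Sad", [
      ("Lonely", ["Isolated", "Abandoned"]),
      ("Vulnerable", ["Victimized", "Fragile"]),
      ("Despair", ["Grief", "Powerless"]),
      ("Guilty", ["Ashamed", "Remorseful"]),
      ("Depressed", ["Inferior", "Empty"]),
      ("Hurt", ["Embarrassed", "Disappointed"])]),
  ("Disgusted", [
      ("Disapproving", ["Judgmental", "Embarrassed"]),
      ("Disappointed", ["Appalled", "Revolted"]),
      ("Awful", ["Nauseated", "Detestable"]),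
      ("Repelled", ["Horrified", "Hesitant"])]),
  ("Angry", [
      ("Let Down", ["Betrayed", "Resentful"]),
      ("Humiliated", ["Disrespected", "Ridiculed"]),
      ("Bitter", ["Indignant", "Violated"]),
      ("Mad", ["Furious", "Jealous"]),
      ("Aggressive", ["Provoked", "Hostile"]),
      ("Frustrated", ["Infuriated", "Annoyed"]),
      ("Distant", ["Withdrawn", "Numb"]),
      ("Critical", ["Skeptical", "Dismissive"])]),
  ("Fearful", [
      ("Scared", ["Helpless", "Frightened"]),
      ("Anxious", ["Overwhelmed", "Worried"]),
      ("Insecure", ["Inadequate", "Inferior"]),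
      ("Weak", ["Worthless", "Insignificant"]),
      ("Rejected", ["Excluded", "Persecuted"]),
      ("Threatened", ["Nervous", "Exposed"])]),
  ("Bad", [
      ("Bored", ["Indifferent", "Apathetic"]),
      ("Busy", ["Pressured", "Rushed"]),
      ("Stressed", ["Overwhelmed", "Out of control"]),
      ("Tired", ["Sleepy", "Unfocused"])]),
  ("Surprised", [
      ("Startled", ["Shocked", "Dismayed"]),
      ("Confused", ["Disillusioned", "Perplexed"]),
      ("Amazed", ["Astonished", "Awe"]),
      ("Excited", ["Eager", "Energetic"])])
]

-- A's nested scan: for each base, test the base, then each secondary's tertiaries then the secondary.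
def scanSecs (emotion base : String) : List (String × List String) → Option (List String)
  | [] => none
  | (sec, terts) :: rest =>
      if terts.contains emotion then some [base, sec, emotion]
      else if emotion == sec then some [base, emotion]
      else scanSecs emotion base rest

def scanBases (emotion : String) : List (String × List (String × List String)) → List String
  | [] => []
  | (base, secs) :: rest =>
      if emotion == base then [emotion]
      else
        match scanSecs emotion base secs with
        | some r => r
        | none => scanBases emotion rest

def find_emotion_ancestors (emotion : String) : List String :=
  scanBases emotion emotionsStructure

-- ===== PORT B =====
-- Source B's flat literal table _ancestor_paths (unique keys): dict → association list.
def ancestorPaths : List (String × List String) := [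
  ("Happy", ["Happy"]),
  ("Aroused", ["Happy", "Playful", "Aroused"]),
  ("Cheeky", ["Happy", "Playful", "Cheeky"]),
  ("Playful", ["Happy", "Playful"]),
  ("Free", ["Happy", "Content", "Free"]),
  ("Joyful", ["Happy", "Content", "Joyful"]),
  ("Content", ["Happy", "Content"]),
  ("Curious", ["Happy", "Interested", "Curious"]),
  ("Inquisitive", ["Happy", "Interested", "Inquisitive"]),
  ("Interested", ["Happy", "Interested"]),
  ("Successful", ["Happy", "Proud", "Successful"]),
  ("Confident", ["Happy", "Proud", "Confident"]),
  ("Proud", ["Happy", "Proud"]),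
  ("Respected", ["Happy", "Accepted", "Respected"]),
  ("Valued", ["Happy", "Accepted", "Valued"]),
  ("Accepted", ["Happy", "Accepted"]),
  ("Courageous", ["Happy", "Powerful", "Courageous"]),
  ("Creative", ["Happy", "Powerful", "Creative"]),
  ("Powerful", ["Happy", "Powerful"]),
  ("Loving", ["Happy", "Peaceful", "Loving"]),
  ("Thankful", ["Happy", "Peaceful", "Thankful"]),
  ("Peaceful", ["Happy", "Peaceful"]),
  ("Intimate", ["Happy", "Trusting", "Intimate"]),
  ("Sensitive", ["Happy", "Trusting", "Sensitive"]),
  ("Trusting", ["Happy", "Trusting"]),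
  ("Sad", ["Sad"]),
  ("Isolated", ["Sad", "Lonely", "Isolated"]),
  ("Abandoned", ["Sad", "Lonely", "Abandoned"]),
  ("Lonely", ["Sad", "Lonely"]),
  ("Victimized", ["Sad", "Vulnerable", "Victimized"]),
  ("Fragile", ["Sad", "Vulnerable", "Fragile"]),
  ("Vulnerable", ["Sad", "Vulnerable"]),
  ("Grief", ["Sad", "Despair", "Grief"]),
  ("Powerless", ["Sad", "Despair", "Powerless"]),
  ("Despair", ["Sad", "Despair"]),
  ("Ashamed", ["Sad", "Guilty", "Ashamed"]),
  ("Remorseful", ["Sad", "Guilty", "Remorseful"]),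
  ("Guilty", ["Sad", "Guilty"]),
  ("Inferior", ["Sad", "Depressed", "Inferior"]),
  ("Empty", ["Sad", "Depressed", "Empty"]),
  ("Depressed", ["Sad", "Depressed"]),
  ("Embarrassed", ["Sad", "Hurt", "Embarrassed"]),
  ("Disappointed", ["Sad", "Hurt", "Disappointed"]),
  ("Hurt", ["Sad", "Hurt"]),
  ("Disgusted", ["Disgusted"]),
  ("Judgmental", ["Disgusted", "Disapproving", "Judgmental"]),
  ("Disapproving", ["Disgusted", "Disapproving"]),
  ("Appalled", ["Disgusted", "Disappointed", "Appalled"]),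
  ("Revolted", ["Disgusted", "Disappointed", "Revolted"]),
  ("Nauseated", ["Disgusted", "Awful", "Nauseated"]),
  ("Detestable", ["Disgusted", "Awful", "Detestable"]),
  ("Awful", ["Disgusted", "Awful"]),
  ("Horrified", ["Disgusted", "Repelled", "Horrified"]),
  ("Hesitant", ["Disgusted", "Repelled", "Hesitant"]),
  ("Repelled", ["Disgusted", "Repelled"]),
  ("Angry", ["Angry"]),
  ("Betrayed", ["Angry", "Let Down", "Betrayed"]),
  ("Resentful", ["Angry", "Let Down", "Resentful"]),
  ("Let Down", ["Angry", "Let Down"]),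
  ("Disrespected", ["Angry", "Humiliated", "Disrespected"]),
  ("Ridiculed", ["Angry", "Humiliated", "Ridiculed"]),
  ("Humiliated", ["Angry", "Humiliated"]),
  ("Indignant", ["Angry", "Bitter", "Indignant"]),
  ("Violated", ["Angry", "Bitter", "Violated"]),
  ("Bitter", ["Angry", "Bitter"]),
  ("Furious", ["Angry", "Mad", "Furious"]),
  ("Jealous", ["Angry", "Mad", "Jealous"]),
  ("Mad", ["Angry", "Mad"]),
  ("Provoked", ["Angry", "Aggressive", "Provoked"]),
  ("Hostile", ["Angry", "Aggressive", "Hostile"]),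
  ("Aggressive", ["Angry", "Aggressive"]),
  ("Infuriated", ["Angry", "Frustrated", "Infuriated"]),
  ("Annoyed", ["Angry", "Frustrated", "Annoyed"]),
  ("Frustrated", ["Angry", "Frustrated"]),
  ("Withdrawn", ["Angry", "Distant", "Withdrawn"]),
  ("Numb", ["Angry", "Distant", "Numb"]),
  ("Distant", ["Angry", "Distant"]),
  ("Skeptical", ["Angry", "Critical", "Skeptical"]),
  ("Dismissive", ["Angry", "Critical", "Dismissive"]),
  ("Critical", ["Angry", "Critical"]),
  ("Fearful", ["Fearful"]),
  ("Helpless", ["Fearful", "Scared", "Helpless"]),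
  ("Frightened", ["Fearful", "Scared", "Frightened"]),
  ("Scared", ["Fearful", "Scared"]),
  ("Overwhelmed", ["Fearful", "Anxious", "Overwhelmed"]),
  ("Worried", ["Fearful", "Anxious", "Worried"]),
  ("Anxious", ["Fearful", "Anxious"]),
  ("Inadequate", ["Fearful", "Insecure", "Inadequate"]),
  ("Insecure", ["Fearful", "Insecure"]),
  ("Worthless", ["Fearful", "Weak", "Worthless"]),
  ("Insignificant", ["Fearful", "Weak", "Insignificant"]),
  ("Weak", ["Fearful", "Weak"]),
  ("Excluded", ["Fearful", "Rejected", "Excluded"]),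
  ("Persecuted", ["Fearful", "Rejected", "Persecuted"]),
  ("Rejected", ["Fearful", "Rejected"]),
  ("Nervous", ["Fearful", "Threatened", "Nervous"]),
  ("Exposed", ["Fearful", "Threatened", "Exposed"]),
  ("Threatened", ["Fearful", "Threatened"]),
  ("Bad", ["Bad"]),
  ("Indifferent", ["Bad", "Bored", "Indifferent"]),
  ("Apathetic", ["Bad", "Bored", "Apathetic"]),
  ("Bored", ["Bad", "Bored"]),
  ("Pressured", ["Bad", "Busy", "Pressured"]),
  ("Rushed", ["Bad", "Busy", "Rushed"]),
  ("Busy", ["Bad", "Busy"]),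
  ("Out of control", ["Bad", "Stressed", "Out of control"]),
  ("Stressed", ["Bad", "Stressed"]),
  ("Sleepy", ["Bad", "Tired", "Sleepy"]),
  ("Unfocused", ["Bad", "Tired", "Unfocused"]),
  ("Tired", ["Bad", "Tired"]),
  ("Surprised", ["Surprised"]),
  ("Shocked", ["Surprised", "Startled", "Shocked"]),
  ("Dismayed", ["Surprised", "Startled", "Dismayed"]),
  ("Startled", ["Surprised", "Startled"]),
  ("Disillusioned", ["Surprised", "Confused", "Disillusioned"]),
  ("Perplexed", ["Surprised", "Confused", "Perplexed"]),
  ("Confused", ["Surprised", "Confused"]),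
  ("Astonished", ["Surprised", "Amazed", "Astonished"]),
  ("Awe", ["Surprised", "Amazed", "Awe"]),
  ("Amazed", ["Surprised", "Amazed"]),
  ("Eager", ["Surprised", "Excited", "Eager"]),
  ("Energetic", ["Surprised", "Excited", "Energetic"]),
  ("Excited", ["Surprised", "Excited"])
]

-- _ancestor_paths.get(emotion, []): first-match lookup on the association list.
def find_emotion_ancestors_alt (emotion : String) : List String :=
  ((ancestorPaths.lookup emotion).getD [])

-- ===== PRECONDITION & SPEC =====
def Spec_find_emotion_ancestors (emotion : String) (out : List String) : Prop := out = find_emotion_ancestors_alt emotion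
instance (emotion : String) (out : List String) : Decidable (Spec_find_emotion_ancestors emotion out) := by unfold Spec_find_emotion_ancestors; infer_instance

-- ===== CLAIM (what is proved, stated in full; the proofs are below) =====
def Claim_equal_find_emotion_ancestors : Prop := ∀ (emotion : String), Dom_find_emotion_ancestors emotion → Spec_find_emotion_ancestors emotion (find_emotion_ancestors emotion)

-- ===== LEMMAS AND PROOFS =====
def namesOf (struct : List (String × List (String × List String))) : List String :=
  struct.flatMap (fun p => p.1 :: p.2.flatMap (fun q => q.1 :: q.2))

def allEmoNames : List String := namesOf emotionsStructure

lemma scanSecs_none (e base : String) (secs : List (String × List String))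
    (h : ∀ q ∈ secs, e ≠ q.1 ∧ e ∉ q.2) : scanSecs e base secs = none := by
  induction secs with
  | nil => rfl
  | cons q rest ih =>
      obtain ⟨hne, hnm⟩ := h q (List.mem_cons_self ..)
      have hc : q.2.contains e = false := by simpa using hnm
      simp only [scanSecs, hc, Bool.false_eq_true, if_false]
      rw [if_neg (by simpa using hne)]
      exact ih (fun q' hq' => h q' (List.mem_cons_of_mem _ hq'))

lemma mem_namesOf (e : String) (struct : List (String × List (String × List String))) :
    e ∈ namesOf struct ↔ ∃ p ∈ struct, e = p.1 ∨ ∃ q ∈ p.2, e = q.1 ∨ e ∈ q.2 := by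
  simp [namesOf]

lemma scanBases_nil (e : String) (struct : List (String × List (String × List String)))
    (h : e ∉ namesOf struct) : scanBases e struct = [] := by
  rw [mem_namesOf] at h
  push Not at h
  induction struct with
  | nil => rfl
  | cons p rest ih =>
      obtain ⟨hne, hsec⟩ := h p (List.mem_cons_self ..)
      have hs : scanSecs e p.1 p.2 = none := scanSecs_none e p.1 p.2 hsec
      simp only [scanBases, hs]
      rw [if_neg (by simpa using hne)]
      exact ih (fun p' hp' => h p' (List.mem_cons_of_mem _ hp'))

set_option maxRecDepth 40000 in
lemma agree_on_names :
    ∀ e ∈ allEmoNames, find_emotion_ancestors e = find_emotion_ancestors_alt e := by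
  decide

set_option maxRecDepth 40000 in
lemma keys_sub : ∀ k ∈ ancestorPaths.map Prod.fst, k ∈ allEmoNames := by decide

lemma lookup_none_of_not_key {α β : Type} [BEq α] [LawfulBEq α] (e : α)
    (l : List (α × β)) (h : e ∉ l.map Prod.fst) : l.lookup e = none := by
  induction l with
  | nil => rfl
  | cons p rest ih =>
      simp only [List.map_cons, List.mem_cons] at h
      push Not at h
      simp only [List.lookup]
      rw [show (e == p.1) = false from beq_eq_false_iff_ne.mpr h.1]
      exact ih h.2

theorem find_emotion_ancestors_spec : Claim_equal_find_emotion_ancestors := by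
  intro e _
  unfold Spec_find_emotion_ancestors
  by_cases he : e ∈ allEmoNames
  · exact agree_on_names e he
  · have ha : find_emotion_ancestors e = [] := scanBases_nil e _ he
    have hk : e ∉ ancestorPaths.map Prod.fst := fun h => he (keys_sub e h)
    have hb : find_emotion_ancestors_alt e = [] := by
      unfold find_emotion_ancestors_alt
      rw [lookup_none_of_not_key e _ hk]
      rfl
    rw [ha, hb]
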